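-- pv_equiv track=rewrite | github.com/zjunyi19/Youtube_DNN | Data/data.py | extract_embedding_catagory
-- ===== SOURCE A (Python) =====
-- def extract_embedding_catagory(business):
--     extracted_data = dict()
--     cid_set = set()
--     for key, value in business.items():
--         cid = []
--         for _, c_value in value['vector'].items():
--             cid.append(c_value)
--             cid_set.add(c_value)
--         extracted_data[key] = cid
--     return extracted_data, len(cid_set)
-- ===== SOURCE B (Python) =====
-- def extract_embedding_catagory(business):
--     extracted_data = {key: [c for c in value['vector'].values()] for key, value in business.items()}
--     vals = sorted(v for lst in extracted_data.values() for v in lst)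
--     distinct = (1 if vals else 0) + sum(1 for a, b in zip(vals, vals[1:]) if a != b)
--     return extracted_data, distinct
-- ===== Notes on version B (the rewrite author's own statement) =====
-- stated objective: alternative
-- what changed: The distinct-value count is computed without any set: B builds the table with a dict comprehension, then sorts the flattened values and counts adjacent-unequal boundaries (sort-then-scan), whereas A maintains a hash set inside one fused accumulating loop.
import Mathlib
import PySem

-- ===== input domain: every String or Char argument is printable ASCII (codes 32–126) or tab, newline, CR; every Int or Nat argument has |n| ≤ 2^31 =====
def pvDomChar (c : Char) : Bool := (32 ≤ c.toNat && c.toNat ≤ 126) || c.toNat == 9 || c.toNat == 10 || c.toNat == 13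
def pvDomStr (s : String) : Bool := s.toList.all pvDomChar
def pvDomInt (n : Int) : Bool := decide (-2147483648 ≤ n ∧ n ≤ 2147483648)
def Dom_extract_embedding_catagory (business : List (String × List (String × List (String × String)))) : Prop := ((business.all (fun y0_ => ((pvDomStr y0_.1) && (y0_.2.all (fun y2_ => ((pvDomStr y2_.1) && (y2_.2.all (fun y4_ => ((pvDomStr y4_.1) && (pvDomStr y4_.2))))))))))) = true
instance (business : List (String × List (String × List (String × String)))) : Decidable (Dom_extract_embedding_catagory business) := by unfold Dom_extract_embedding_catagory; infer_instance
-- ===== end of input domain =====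

-- B builds the table with a dict comprehension and then computes the distinct-value
-- count with no set at all: it sorts the flattened values and counts adjacent-unequal
-- boundaries (sort-then-scan), instead of A's fused loop maintaining a hash set.


-- ===== PORT A =====
-- A: one fused loop over business; for each entry it looks up value['vector'],
-- appends its values to cid (list) while adding each to the global set cid_set,
-- and inserts cid into extracted_data; returns (extracted_data, len(cid_set)).
def extract_embedding_catagory (business : List (String × List (String × List (String × String)))) : (List (String × List String)) × Int :=
  let st := business.foldl
    (fun (st : PySem.Dict String (List String) × PySem.Set String) kv =>
      let inner := ((List.lookup "vector" kv.2).getD []).foldl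
        (fun (p : List String × PySem.Set String) q => (p.1 ++ [q.2], PySem.Set.add p.2 q.2))
        ([], st.2)
      (st.1.insert kv.1 inner.1, inner.2))
    (PySem.Dict.empty, PySem.Set.empty)
  (st.1.items, (st.2.length : Int))

-- ===== PORT B =====
-- B: dict comprehension building the table; then sort the flattened values and
-- count adjacent-unequal boundaries to get the distinct count (no set).
def extract_embedding_catagory_alt (business : List (String × List (String × List (String × String)))) : (List (String × List String)) × Int :=
  let ed := business.foldl
    (fun (d : PySem.Dict String (List String)) kv =>
      d.insert kv.1 (((List.lookup "vector" kv.2).getD []).map Prod.snd))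
    PySem.Dict.empty
  let vals := PySem.List.sorted ed.values.flatten (fun x => x) false
  let distinct : Int :=
    (if vals = [] then 0 else 1) + ((vals.zip vals.tail).countP (fun p => decide (p.1 ≠ p.2)) : Int)
  (ed.items, distinct)

-- ===== PRECONDITION & SPEC =====
-- Pre_ excludes (a) entries without a 'vector' key, on which the Python A raises KeyError,
-- and (b) association lists with duplicate keys at any dict level, which do not represent
-- Python dicts (a Python dict argument can never carry duplicate keys).
def Pre_extract_embedding_catagory (business : List (String × List (String × List (String × String)))) : Prop :=
  (business.map Prod.fst).Nodup ∧
  ∀ p ∈ business, (List.lookup "vector" p.2).isSome = true ∧ (p.2.map Prod.fst).Nodup ∧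
    ∀ q ∈ p.2, (q.2.map Prod.fst).Nodup
instance (business : List (String × List (String × List (String × String)))) : Decidable (Pre_extract_embedding_catagory business) := by unfold Pre_extract_embedding_catagory; infer_instance

def pvWitness_extract_embedding_catagory : (List (String × List (String × List (String × String)))) :=
  [("b1", [("vector", [("c1", "x"), ("c2", "y")])]), ("b2", [("vector", [("c3", "x")])])]

def Spec_extract_embedding_catagory (business : List (String × List (String × List (String × String)))) (out : (List (String × List String)) × Int) : Prop := out = extract_embedding_catagory_alt business
instance (business : List (String × List (String × List (String × String)))) (out : (List (String × List String)) × Int) : Decidable (Spec_extract_embedding_catagory business out) := by unfold Spec_extract_embedding_catagory; infer_instance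

-- ===== CLAIM (what is proved, stated in full; the proofs are below) =====
def Claim_equal_extract_embedding_catagory : Prop := ∀ (business : List (String × List (String × List (String × String)))), Dom_extract_embedding_catagory business → Pre_extract_embedding_catagory business → Spec_extract_embedding_catagory business (extract_embedding_catagory business)

-- ===== LEMMAS AND PROOFS =====

-- the per-business value list both sides extract
def pvCid (kv : String × List (String × List (String × String))) : List String :=
  ((List.lookup "vector" kv.2).getD []).map Prod.snd

-- A's inner loop: appending values while adding them to the set, as two independent folds
lemma innerA_eq (vec : List (String × String)) (acc : List String) (s : PySem.Set String) :
    vec.foldl (fun (p : List String × PySem.Set String) q =>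
        (p.1 ++ [q.2], PySem.Set.add p.2 q.2)) (acc, s)
      = (acc ++ vec.map Prod.snd, PySem.Set.update s (vec.map Prod.snd)) := by
  rw [PySem.List.foldl_prod_mk (f := fun a (q : String × String) => a ++ [q.2])
        (g := fun s (q : String × String) => PySem.Set.add s q.2)]
  rw [PySem.List.foldl_append_singleton_eq_map, ← PySem.Set.update_map_eq_foldl_add]

-- the set-accumulating half of the fused loop, as one global update
lemma setFold_eq {β : Type} (m : β → List String) (l : List β) (s : PySem.Set String) :
    l.foldl (fun s b => PySem.Set.update s (m b)) s
      = PySem.Set.update s (l.flatMap m) := by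
  induction l generalizing s with
  | nil => simp [PySem.Set.update_nil]
  | cons b t ih => rw [List.foldl_cons, ih, List.flatMap_cons, PySem.Set.update_append]

-- A's outer loop, split into the dict-building fold and one global set update
lemma outerA_eq (l : List (String × List (String × List (String × String))))
    (d : PySem.Dict String (List String)) (s : PySem.Set String) :
    l.foldl (fun (st : PySem.Dict String (List String) × PySem.Set String) kv =>
        let inner := ((List.lookup "vector" kv.2).getD []).foldl
          (fun (p : List String × PySem.Set String) q => (p.1 ++ [q.2], PySem.Set.add p.2 q.2))
          ([], st.2)
        (st.1.insert kv.1 inner.1, inner.2)) (d, s)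
      = (l.foldl (fun d kv => d.insert kv.1 (pvCid kv)) d,
         PySem.Set.update s (l.flatMap pvCid)) := by
  simp only [innerA_eq, List.nil_append, pvCid]
  rw [PySem.List.foldl_prod_mk
        (f := fun d (kv : String × List (String × List (String × String))) =>
          PySem.Dict.insert d kv.1 (List.map Prod.snd ((List.lookup "vector" kv.2).getD [])))
        (g := fun s (kv : String × List (String × List (String × String))) =>
          PySem.Set.update s (List.map Prod.snd ((List.lookup "vector" kv.2).getD []))),
      setFold_eq]
  rfl

-- sort-then-scan on a (≤-)sorted list counts exactly its distinct elements
lemma scan_sorted_card (s : List String) (hs : s.Pairwise (· ≤ ·)) :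
    (if s = [] then 0 else 1) + (s.zip s.tail).countP (fun p => decide (p.1 ≠ p.2))
      = s.toFinset.card := by
  induction s with
  | nil => simp
  | cons a t ih =>
    cases t with
    | nil => simp
    | cons b u =>
      have hab : a ≤ b := (List.pairwise_cons.mp hs).1 b (by simp)
      have hs' : (b :: u).Pairwise (· ≤ ·) := (List.pairwise_cons.mp hs).2
      have ih' := ih hs'
      simp only [List.tail_cons, List.zip_cons_cons, List.countP_cons] at ih' ⊢
      by_cases hEq : a = b
      · subst hEq
        simpa using ih'
      · have hnot : a ∉ b :: u := by
          intro hmem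
          rcases List.mem_cons.mp hmem with h | hmem'
          · exact hEq h
          · have hba : b ≤ a := List.rel_of_pairwise_cons hs' hmem'
            exact hEq (le_antisymm hab hba)
        have hcard : (a :: b :: u).toFinset.card = (b :: u).toFinset.card + 1 := by
          simp only [List.toFinset_cons (a := a)]
          rw [Finset.card_insert_of_notMem (by simpa using hnot)]
        simp only [hcard, ← ih']
        simp [hEq]
        omega

-- the distinct count of any list equals sort-then-scan on its sorted rearrangement
lemma distinct_eq_scan (l : List String) :
    ((PySem.Set.ofList l).length : Int)
      = (if PySem.List.sorted l (fun x => x) false = [] then 0 else 1)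
        + ((PySem.List.sorted l (fun x => x) false).zip
            (PySem.List.sorted l (fun x => x) false).tail).countP (fun p => decide (p.1 ≠ p.2)) := by
  have hnd := PySem.Set.nodup_ofList (xs := l)
  have hlen : (PySem.Set.ofList l).length = l.toFinset.card := by
    have hts : (PySem.Set.ofList l).toFinset = l.toFinset := by
      ext x; simp [PySem.Set.mem_ofList]
    rw [← List.toFinset_card_of_nodup hnd, hts]
  have hperm : (PySem.List.sorted l (fun x => x) false).Perm l :=
    PySem.List.sorted_perm l (fun x => x) false
  have hts2 : (PySem.List.sorted l (fun x => x) false).toFinset = l.toFinset := by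
    ext x; simp [List.mem_toFinset, hperm.mem_iff]
  have hsorted : (PySem.List.sorted l (fun x => x) false).Pairwise (· ≤ ·) :=
    PySem.List.sorted_pairwise l (fun x => x)
  have := scan_sorted_card _ hsorted
  rw [hts2] at this
  rw [hlen, ← this]
  push_cast
  ring

theorem extract_embedding_catagory_spec : Claim_equal_extract_embedding_catagory := by
  intro business _ hpre
  unfold Spec_extract_embedding_catagory extract_embedding_catagory extract_embedding_catagory_alt
  rw [outerA_eq]
  have hitems : (business.foldl (fun d kv => d.insert kv.1 (pvCid kv)) PySem.Dict.empty).items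
      = business.map (fun kv => (kv.1, pvCid kv)) := by
    rw [PySem.Dict.items_foldl_insert_fresh (k := Prod.fst) (v := pvCid)
        (hdis := fun a _ => PySem.Dict.contains_empty _) (hnd := hpre.1)]
    simp [PySem.Dict.empty]
  simp only [pvCid] at hitems
  have hflat : ((business.foldl
      (fun d kv => d.insert kv.1 (((List.lookup "vector" kv.2).getD []).map Prod.snd))
      PySem.Dict.empty).values).flatten
      = business.flatMap pvCid := by
    simp only [PySem.Dict.values, hitems, List.map_map, Function.comp_def,
      List.flatMap_def]
    rfl
  simp only [hflat]
  have hset : PySem.Set.update PySem.Set.empty (business.flatMap pvCid)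
      = PySem.Set.ofList (business.flatMap pvCid) := rfl
  simp only [hset, Prod.mk.injEq]
  refine ⟨by simp [pvCid, hitems], ?_⟩
  exact distinct_eq_scan (business.flatMap pvCid)
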